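-- pv_equiv track=rewrite | github.com/jasmeenlongia/hackerrank-string-algo | Mars_Exploration.py | marsExploration
-- ===== SOURCE A (Python) =====
-- def marsExploration(s):
--     changes = 0
--     for i in range(len(s)):
--         if i%3 == 0 or i%3 == 2:
--             if s[i] != 'S':
--                 changes += 1
--         elif 1%3 == 1:
--             if s[i] != 'O':
--                 changes += 1
--     return changes
-- ===== SOURCE B (Python) =====
-- def marsExploration(s):
--     total = 0
--     pattern = "SOS"
--     for j in range(0, len(s), 3):
--         chunk = s[j:j+3]
--         for k in range(len(chunk)):
--             if chunk[k] != pattern[k]: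
--                 total += 1
--     return total
-- ===== Notes on version B (the rewrite author's own statement) =====
-- stated objective: alternative
-- what changed: B walks the string in 3-character blocks and counts mismatches of each block against the fixed S-O-S pattern, instead of A's flat per-index loop with modular branching on i%3.
import Mathlib
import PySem

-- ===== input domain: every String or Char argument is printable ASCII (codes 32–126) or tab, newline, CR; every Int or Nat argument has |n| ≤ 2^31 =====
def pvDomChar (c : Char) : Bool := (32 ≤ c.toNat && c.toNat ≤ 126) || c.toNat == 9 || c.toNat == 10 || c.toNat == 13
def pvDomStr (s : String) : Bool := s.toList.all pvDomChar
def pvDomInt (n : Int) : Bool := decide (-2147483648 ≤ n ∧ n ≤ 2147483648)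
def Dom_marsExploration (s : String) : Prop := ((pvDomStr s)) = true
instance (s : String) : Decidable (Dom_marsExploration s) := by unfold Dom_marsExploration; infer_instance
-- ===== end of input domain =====

-- B counts mismatches block-wise (3-char chunks against the fixed S-O-S pattern) instead of A's flat per-index loop with i%3 branching; objective: alternative decomposition, same cost.


-- ===== PORT A =====
-- A's loop `for i in range(len(s))` with branching on i % 3, as structural recursion
-- over the character list carrying the index i (the `elif 1%3 == 1` is kept literally).
def goA : List Char → Nat → Int → Int
  | [], _, acc => acc
  | c :: rest, i, acc =>
    goA rest (i + 1)
      (if i % 3 = 0 ∨ i % 3 = 2 then (if c ≠ 'S' then acc + 1 else acc)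
       else if 1 % 3 = 1 then (if c ≠ 'O' then acc + 1 else acc)
       else acc)

def marsExploration (s : String) : Int := goA s.toList 0 0

-- ===== PORT B =====
-- inner loop of B: mismatch count of a chunk against the pattern, position by position
def mismatches : List Char → List Char → Int
  | x :: xs, y :: ys => (if x ≠ y then 1 else 0) + mismatches xs ys
  | _, _ => 0

-- outer loop of B: peel one 3-character chunk per iteration, compare against the pattern
def goB : List Char → Int
  | [] => 0
  | c :: rest =>
      mismatches ((c :: rest).take 3) ['S', 'O', 'S'] + goB ((c :: rest).drop 3)
  termination_by l => l.length
  decreasing_by simp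

def marsExploration_alt (s : String) : Int := goB s.toList

-- ===== PRECONDITION & SPEC =====
def Spec_marsExploration (s : String) (out : Int) : Prop := out = marsExploration_alt s
instance (s : String) (out : Int) : Decidable (Spec_marsExploration s out) := by unfold Spec_marsExploration; infer_instance

-- ===== CLAIM (what is proved, stated in full; the proofs are below) =====
def Claim_equal_marsExploration : Prop := ∀ (s : String), Dom_marsExploration s → Spec_marsExploration s (marsExploration s)

-- ===== LEMMAS AND PROOFS =====
theorem goB_nil : goB [] = 0 := by unfold goB; rfl

theorem goB_one (a : Char) : goB [a] = (if a ≠ 'S' then (1:Int) else 0) := by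
  conv_lhs => rw [goB.eq_def]
  simp [mismatches, goB_nil]

theorem goB_two (a b : Char) :
    goB [a, b] = (if a ≠ 'S' then (1:Int) else 0) + (if b ≠ 'O' then (1:Int) else 0) := by
  conv_lhs => rw [goB.eq_def]
  simp [mismatches, goB_nil]

theorem goB_cons3 (a b c : Char) (rest : List Char) :
    goB (a :: b :: c :: rest) =
      (if a ≠ 'S' then (1:Int) else 0) + (if b ≠ 'O' then (1:Int) else 0) +
        (if c ≠ 'S' then (1:Int) else 0) + goB rest := by
  conv_lhs => rw [goB.eq_def]
  simp [mismatches]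
  ring

theorem goA_shift (l : List Char) : ∀ (i : Nat) (a : Int), goA l i a = a + goA l i 0 := by
  induction l with
  | nil => intro i a; simp [goA]
  | cons c rest ih =>
    intro i a
    simp only [goA]
    rw [ih]
    nth_rewrite 2 [ih]
    split_ifs <;> ring

theorem goA_eq_goB (n : Nat) :
    ∀ (l : List Char), l.length ≤ n → ∀ i : Nat, i % 3 = 0 → goA l i 0 = goB l := by
  induction n with
  | zero =>
    intro l hl i hi
    have : l = [] := List.length_eq_zero_iff.mp (Nat.le_zero.mp hl)
    subst this; simp [goA, goB_nil]
  | succ n ih =>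
    intro l hl i hi
    match l with
    | [] => simp [goA, goB_nil]
    | [a] =>
      rw [goB_one]
      simp [goA, hi]
    | [a, b] =>
      have h1 : (i + 1) % 3 = 1 := by omega
      rw [goB_two]
      simp [goA, hi, h1]
      split_ifs <;> ring
    | a :: b :: c :: rest =>
      have h1 : (i + 1) % 3 = 1 := by omega
      have h2 : (i + 1 + 1) % 3 = 2 := by omega
      have h3 : (i + 1 + 1 + 1) % 3 = 0 := by omega
      have hr : rest.length ≤ n := by simp at hl; omega
      rw [goB_cons3, ← ih rest hr (i + 1 + 1 + 1) h3]
      simp only [goA, hi, h1, h2]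
      rw [goA_shift]
      try simp
      split_ifs <;> ring

-- ===== VERDICT (by name: the statement is the Claim_ definition above) =====
theorem marsExploration_spec : Claim_equal_marsExploration := by
  intro s _
  unfold Spec_marsExploration marsExploration marsExploration_alt
  exact goA_eq_goB s.toList.length s.toList le_rfl 0 rfl
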